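-- pv_equiv track=rewrite | github.com/Madokamiiiiii/AdventOfCode-2023 | Day11/day11.py | double_columns_with_only_dots
-- ===== SOURCE A (Python) =====
-- def double_columns_with_only_dots(arr):
--     rows = len(arr)
--     cols = len(arr[0])
--
--     col = 0
--     while col < cols:
--         col_values = [arr[row][col] for row in range(rows)]
--
--         if all(value == '.' for value in col_values):
--             for row in range(rows):
--                 arr[row] = arr[row][:col] + '.' + arr[row][col:]
--             col += 2
--         else:
--             col += 1
--         cols = len(arr[0])
--
--     return arr
-- ===== SOURCE B (Python) =====
-- def double_columns_with_only_dots(arr):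
--     cols = len(arr[0])
--     empty = {c for c in range(cols) if all(row[c] == '.' for row in arr)}
--     for i, row in enumerate(arr):
--         arr[i] = ''.join('.' + ch if c in empty else ch for c, ch in enumerate(row))
--     return arr
-- ===== Notes on version B (the rewrite author's own statement) =====
-- stated objective: alternative
-- what changed: B finds all all-dot columns once in a single pass and rebuilds each row with one join inserting a dot before each such column, instead of A's while-loop that re-slices and re-concatenates every row string for every empty column.
import Mathlib
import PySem

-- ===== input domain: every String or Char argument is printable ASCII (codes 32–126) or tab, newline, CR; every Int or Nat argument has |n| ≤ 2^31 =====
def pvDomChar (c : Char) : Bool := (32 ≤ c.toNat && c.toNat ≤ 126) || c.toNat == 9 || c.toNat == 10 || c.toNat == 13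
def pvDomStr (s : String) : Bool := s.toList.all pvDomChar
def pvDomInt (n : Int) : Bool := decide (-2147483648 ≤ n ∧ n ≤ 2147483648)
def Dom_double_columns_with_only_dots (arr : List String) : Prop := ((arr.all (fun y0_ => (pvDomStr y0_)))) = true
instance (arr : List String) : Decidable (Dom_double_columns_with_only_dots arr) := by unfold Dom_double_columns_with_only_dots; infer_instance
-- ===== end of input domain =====

-- B finds the all-dot columns once and rebuilds each row with a single join, instead of A's
-- while-loop that re-slices and re-concatenates every row string for every empty column;
-- both A and B rebind arr's entries in place in Python, the equivalence proved here is about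
-- the return value.

-- ===== PORT A =====
-- arr[row][:col] + '.' + arr[row][col:] — exact for the nonnegative index col (s[:n] = take, s[n:] = drop)
def dcInsertRow (col : Nat) (s : String) : String :=
  String.ofList (s.toList.take col ++ '.' :: s.toList.drop col)

-- the while-loop of A; fuel-indexed recursion: the measure cols - col shrinks by exactly 1 per
-- iteration, so the initial fuel len(arr[0]) + 1 is never exhausted (the equivalence proof
-- never reaches the fuel-0 case while col < cols).
-- arr[row][col] is read as toList.getD col ' ': in range on every input Pre_ admits (Python raises otherwise).
def dcLoop : Nat → List String → Nat → List String
  | 0, arr, _ => arr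
  | fuel+1, arr, col =>
    let rows := arr.length
    let cols := (arr.headD "").toList.length
    if col < cols then
      let colVals := (List.range rows).map (fun r => ((arr.getD r "").toList).getD col ' ')
      if colVals.all (fun v => v == '.') then
        dcLoop fuel ((List.range rows).foldl (fun a r => a.set r (dcInsertRow col (a.getD r ""))) arr) (col+2)
      else dcLoop fuel arr (col+1)
    else arr

def double_columns_with_only_dots (arr : List String) : List String :=
  dcLoop ((arr.headD "").toList.length + 1) arr 0

-- ===== PORT B =====
-- row[c] in the column test is read as toList.getD c.toNat ' ': c ∈ range(cols) is nonnegative and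
-- in range on every input Pre_ admits (Python raises otherwise).
def double_columns_with_only_dots_alt (arr : List String) : List String :=
  let cols : Int := ((arr.headD "").toList.length : Int)
  let empty : PySem.Set Int := PySem.Set.ofList
    ((PySem.List.pyRange 0 cols 1).filter (fun c => arr.all (fun row => row.toList.getD c.toNat ' ' == '.')))
  arr.map (fun row => String.ofList
    ((PySem.List.enumerate row.toList).flatMap (fun q => if q.1 ∈ empty then '.' :: [q.2] else [q.2])))

-- ===== PRECONDITION & SPEC =====
-- Exactly the inputs on which the Python A returns: arr nonempty (otherwise len(arr[0]) raises IndexError)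
-- and no row shorter than the first (otherwise arr[row][col] raises IndexError at some column).
def Pre_double_columns_with_only_dots (arr : List String) : Prop :=
  arr ≠ [] ∧ ∀ s ∈ arr, (arr.headD "").toList.length ≤ s.toList.length

instance (arr : List String) : Decidable (Pre_double_columns_with_only_dots arr) := by
  unfold Pre_double_columns_with_only_dots; infer_instance

def pvWitness_double_columns_with_only_dots : List String := ["#.", ".."]

def Spec_double_columns_with_only_dots (arr : List String) (out : List String) : Prop :=
  out = double_columns_with_only_dots_alt arr
instance (arr : List String) (out : List String) : Decidable (Spec_double_columns_with_only_dots arr out) := by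
  unfold Spec_double_columns_with_only_dots; infer_instance

-- ===== CLAIM (what is proved, stated in full; the proofs are below) =====
def Claim_equal_double_columns_with_only_dots : Prop := ∀ (arr : List String), Dom_double_columns_with_only_dots arr → Pre_double_columns_with_only_dots arr → Spec_double_columns_with_only_dots arr (double_columns_with_only_dots arr)

-- ===== LEMMAS AND PROOFS =====

-- proof-only model: insert '.' before every position (counted from k) satisfying p
def insFrom (p : Int → Bool) : Int → List Char → List Char
  | _, [] => []
  | k, ch :: t => (if p k then ['.', ch] else [ch]) ++ insFrom p (k+1) t

-- the predicate "column c (≥ col, < current width) consists of dots only"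
def eaPred (m : List String) (col : Nat) (c : Int) : Bool :=
  decide ((col : Int) ≤ c) && decide (c < ((m.headD "").toList.length : Int))
    && m.all (fun row => row.toList.getD c.toNat ' ' == '.')

theorem insFrom_of_false (p : Int → Bool) (row : List Char) :
    ∀ k : Int, (∀ c, k ≤ c → c < k + row.length → p c = false) → insFrom p k row = row := by
  induction row with
  | nil => intro k _; rfl
  | cons ch t ih =>
    intro k h
    have h0 : p k = false := h k le_rfl (by simp)
    have ht : insFrom p (k+1) t = t := by
      refine ih (k+1) (fun c hc1 hc2 => h c (by omega) ?_)
      simp only [List.length_cons]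
      push_cast
      push_cast at hc2
      omega
    simp [insFrom, h0, ht]

theorem insFrom_congr (p q : Int → Bool) (row : List Char) :
    ∀ k : Int, (∀ c, k ≤ c → p c = q c) → insFrom p k row = insFrom q k row := by
  induction row with
  | nil => intro k _; rfl
  | cons ch t ih =>
    intro k h
    simp only [insFrom, h k le_rfl, ih (k+1) (fun c hc => h c (by omega))]

theorem insFrom_append (p : Int → Bool) (u : List Char) :
    ∀ (k : Int) (v : List Char),
      insFrom p k (u ++ v) = insFrom p k u ++ insFrom p (k + u.length) v := by
  induction u with
  | nil => intro k v; simp [insFrom]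
  | cons ch t ih =>
    intro k v
    simp only [List.cons_append, insFrom, ih (k+1) v, List.append_assoc, List.length_cons]
    have : k + 1 + (t.length : Int) = k + ((t.length + 1 : Nat) : Int) := by push_cast; omega
    rw [this]

theorem insFrom_shift (p q : Int → Bool) (v : List Char) :
    ∀ k : Int, (∀ c, k + 1 ≤ c → q c = p (c - 1)) → insFrom q (k+1) v = insFrom p k v := by
  induction v with
  | nil => intro k _; rfl
  | cons ch t ih =>
    intro k h
    have h1 : q (k+1) = p k := by rw [h (k+1) le_rfl]; norm_num
    simp only [insFrom, h1]
    rw [ih (k+1) (fun c hc => h c (by omega))]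

theorem insFrom_insert (p q : Int → Bool) (u : List Char) (ch : Char) (v : List Char) (col : Nat)
    (hu : u.length = col)
    (hq_low : ∀ c, c < (col : Int) + 2 → q c = false)
    (hq_shift : ∀ c, (col : Int) + 2 ≤ c → q c = p (c - 1))
    (hp_low : ∀ c, c < (col : Int) → p c = false)
    (hp_col : p col = true) :
    insFrom q 0 (u ++ '.' :: ch :: v) = insFrom p 0 (u ++ ch :: v) := by
  rw [insFrom_append, insFrom_append]
  have hqu : insFrom q 0 u = u :=
    insFrom_of_false q u 0 (fun c hc1 hc2 => hq_low c (by rw [hu] at hc2; omega))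
  have hpu : insFrom p 0 u = u :=
    insFrom_of_false p u 0 (fun c hc1 hc2 => hp_low c (by rw [hu] at hc2; omega))
  rw [hqu, hpu]
  have hcast : (0 : Int) + (u.length : Int) = (col : Int) := by rw [hu]; omega
  rw [hcast]
  have hq1 : q col = false := hq_low _ (by omega)
  have hq2 : q ((col : Int) + 1) = false := hq_low _ (by omega)
  have hsh : insFrom q ((col : Int) + 1 + 1) v = insFrom p ((col : Int) + 1) v :=
    insFrom_shift p q v ((col : Int) + 1) (fun c hc => hq_shift c (by omega))
  simp [insFrom, hq1, hq2, hp_col, hsh]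

-- (range over indices) all = all over the list
theorem range_all_getD {α : Type} (d : α) (f : α → Bool) (m : List α) :
    ((List.range m.length).all (fun r => f (m.getD r d))) = m.all f := by
  induction m with
  | nil => rfl
  | cons x t ih =>
    simp only [List.length_cons, List.range_succ_eq_map, List.all_cons, List.all_map]
    simp only [List.getD_cons_zero]
    rw [← ih]
    simp [Function.comp_def, List.getD, List.getElem?_cons_succ]

-- the in-place row-update loop is a map
theorem foldl_set_range' (g : String → String) (rest : List String) :
    ∀ done : List String,
      (List.range' done.length rest.length 1).foldl
        (fun a r => a.set r (g (a.getD r ""))) (done ++ rest) = done ++ rest.map g := by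
  induction rest with
  | nil => intro done; simp
  | cons x t ih =>
    intro done
    simp only [List.length_cons]
    rw [List.range'_succ, List.foldl_cons]
    have hget : (done ++ x :: t).getD done.length "" = x := by
      simp [List.getD]
    have hset : (done ++ x :: t).set done.length (g x) = (done ++ [g x]) ++ t := by
      rw [List.set_append_right _ _ (le_refl done.length)]
      simp
    rw [hget, hset]
    have h2 := ih (done ++ [g x])
    simp only [List.length_append, List.length_nil, List.length_cons, Nat.zero_add] at h2
    rw [h2]
    simp

theorem foldl_set_range (g : String → String) (m : List String) :
    (List.range m.length).foldl (fun a r => a.set r (g (a.getD r ""))) m = m.map g := by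
  have h := foldl_set_range' g m []
  simpa [List.range_eq_range'] using h

theorem getD_insert_shift (row : List Char) (col : Nat) (hcol : col ≤ row.length)
    (c : Int) (hc : (col : Int) + 1 ≤ c) :
    (row.take col ++ '.' :: row.drop col).getD c.toNat ' ' = row.getD (c-1).toNat ' ' := by
  have hlen : (row.take col).length = col := by simp [hcol]
  have hn : col + 1 ≤ c.toNat := by omega
  simp only [List.getD]
  rw [List.getElem?_append_right (by omega)]
  rw [hlen]
  have : c.toNat - col = (c.toNat - col - 1) + 1 := by omega
  rw [this, List.getElem?_cons_succ, List.getElem?_drop]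
  congr 2
  omega

theorem all_congr_mem {α : Type} {l : List α} {p q : α → Bool}
    (h : ∀ a ∈ l, p a = q a) : l.all p = l.all q := by
  induction l with
  | nil => rfl
  | cons x t ih =>
    simp only [List.all_cons, h x List.mem_cons_self,
      ih (fun a ha => h a (List.mem_cons_of_mem _ ha))]

-- when every relevant column is already processed the spec map is the identity
theorem map_insFrom_trivial (m : List String) (col : Nat)
    (h : (m.headD "").toList.length ≤ col) :
    m.map (fun row => String.ofList (insFrom (eaPred m col) 0 row.toList)) = m := by
  have hfalse : ∀ c : Int, eaPred m col c = false := by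
    intro c
    unfold eaPred
    by_cases h1 : (col : Int) ≤ c
    · have h2 : (decide (c < (((m.headD "").toList.length : Nat) : Int))) = false := by
        apply decide_eq_false; push_cast at h1 ⊢; omega
      rw [h2]
      simp
    · rw [decide_eq_false h1]
      simp
  have hrow : ∀ row ∈ m, String.ofList (insFrom (eaPred m col) 0 row.toList) = row := by
    intro row _
    rw [insFrom_of_false _ _ 0 (fun c _ _ => hfalse c), String.ofList_toList]
  calc m.map (fun row => String.ofList (insFrom (eaPred m col) 0 row.toList))
      = m.map id := List.map_congr_left hrow
    _ = m := List.map_id m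

-- main loop invariant
theorem dcLoop_eq (fuel : Nat) : ∀ (m : List String) (col : Nat),
    (∀ s ∈ m, (m.headD "").toList.length ≤ s.toList.length) →
    (m.headD "").toList.length ≤ fuel + col →
    dcLoop fuel m col = m.map (fun row => String.ofList (insFrom (eaPred m col) 0 row.toList)) := by
  induction fuel with
  | zero =>
    intro m col h1 h2
    rw [map_insFrom_trivial m col (by omega)]
    rfl
  | succ fuel ih =>
    intro m col h1 h2
    by_cases hlt : col < (m.headD "").toList.length
    case neg =>
      rw [map_insFrom_trivial m col (by omega)]
      simp only [dcLoop]
      rw [if_neg hlt]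
    case pos =>
      have hall : (((List.range m.length).map
            (fun r => ((m.getD r "").toList).getD col ' ')).all (fun v => v == '.'))
          = m.all (fun row => row.toList.getD col ' ' == '.') := by
        rw [List.all_map]
        exact range_all_getD "" (fun sR => sR.toList.getD col ' ' == '.') m
      by_cases hdots : m.all (fun row => row.toList.getD col ' ' == '.') = true
      case neg =>
        have hstep : dcLoop (fuel+1) m col = dcLoop fuel m (col+1) := by
          simp only [dcLoop]
          rw [if_pos hlt, if_neg (by rw [hall]; exact hdots)]
        rw [hstep, ih m (col+1) h1 (by omega)]
        apply List.map_congr_left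
        intro row _
        congr 1
        apply insFrom_congr
        intro c _
        by_cases hc : c = (col : Int)
        · subst hc
          unfold eaPred
          have hna : (decide ((((col+1 : Nat)) : Int) ≤ (col : Int))) = false := by
            apply decide_eq_false; push_cast; omega
          have ht : ((col : Int)).toNat = col := by omega
          have e : (m.all fun row => row.toList.getD col ' ' == '.') = false :=
            eq_false_of_ne_true hdots
          rw [ht, hna, e]
          simp
        · unfold eaPred
          have : (decide ((((col+1 : Nat)) : Int) ≤ c)) = (decide (((col : Nat) : Int) ≤ c)) := by
            apply decide_eq_decide.mpr
            constructor <;> (intro h; push_cast at h ⊢; omega)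
          rw [this]
      case pos =>
        have hmg : (List.range m.length).foldl
            (fun a r => a.set r (dcInsertRow col (a.getD r ""))) m = m.map (dcInsertRow col) :=
          foldl_set_range (dcInsertRow col) m
        obtain ⟨hd, tl, rfl⟩ : ∃ hd tl, m = hd :: tl := by
          cases m with
          | nil => simp at hlt
          | cons a b => exact ⟨a, b, rfl⟩
        set m : List String := hd :: tl with hm
        set cols : Nat := (m.headD "").toList.length with hcols
        have hstep : dcLoop (fuel+1) m col = dcLoop fuel (m.map (dcInsertRow col)) (col+2) := by
          simp only [dcLoop]
          rw [if_pos hlt, if_pos (by rw [hall]; exact hdots), hmg]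
        have hglen : ∀ row : String, col ≤ row.toList.length →
            (dcInsertRow col row).toList.length = row.toList.length + 1 := by
          intro row hr
          unfold dcInsertRow
          rw [String.toList_ofList]
          simp
        have hhead : ((m.map (dcInsertRow col)).headD "").toList.length = cols + 1 := by
          rw [hm]
          simp only [List.map_cons, List.headD_cons]
          exact hglen hd (by have := h1 hd (by rw [hm]; exact List.mem_cons_self) ; omega)
        have h1' : ∀ s ∈ m.map (dcInsertRow col),
            ((m.map (dcInsertRow col)).headD "").toList.length ≤ s.toList.length := by
          intro s hs
          rw [List.mem_map] at hs
          obtain ⟨row, hrm, rfl⟩ := hs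
          rw [hhead, hglen row (by have := h1 row hrm; omega)]
          have := h1 row hrm
          omega
        rw [hstep, ih (m.map (dcInsertRow col)) (col+2) h1' (by rw [hhead]; omega)]
        rw [List.map_map]
        apply List.map_congr_left
        intro row hrm
        simp only [Function.comp_apply]
        congr 1
        -- decompose the row
        have hrlen : cols ≤ row.toList.length := h1 row hrm
        have hcoll : col < row.toList.length := by omega
        obtain ⟨ch, v, hdrop⟩ : ∃ ch v, row.toList.drop col = ch :: v := by
          cases hcase : row.toList.drop col with
          | nil => exfalso; rw [List.drop_eq_nil_iff] at hcase; omega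
          | cons a b => exact ⟨a, b, rfl⟩
        have hu : (row.toList.take col).length = col := by rw [List.length_take]; omega
        have hsplit : row.toList = row.toList.take col ++ ch :: v := by
          conv_lhs => rw [← List.take_append_drop col row.toList]
          rw [hdrop]
        have hgrow : (dcInsertRow col row).toList = row.toList.take col ++ '.' :: ch :: v := by
          unfold dcInsertRow
          rw [String.toList_ofList, hdrop]
        rw [hgrow]
        conv_rhs => rw [hsplit]
        apply insFrom_insert _ _ _ _ _ col hu
        · -- hq_low
          intro c hc
          unfold eaPred
          have e : (decide ((((col+2 : Nat)) : Int) ≤ c)) = false := by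
            apply decide_eq_false; omega
          rw [e]
          simp
        · -- hq_shift
          intro c hc
          unfold eaPred
          have e1 : (decide ((((col+2 : Nat)) : Int) ≤ c)) = true := by
            apply decide_eq_true; push_cast; omega
          have e2 : (decide (((col : Nat) : Int) ≤ c - 1)) = true := by
            apply decide_eq_true; omega
          have e3 : (decide (c < ((((m.map (dcInsertRow col)).headD "").toList.length : Nat) : Int)))
              = (decide (c - 1 < ((cols : Nat) : Int))) := by
            apply decide_eq_decide.mpr
            rw [hhead]
            push_cast
            omega
          have hall3 : ((List.map (dcInsertRow col) m).all fun row => row.toList.getD c.toNat ' ' == '.')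
              = (m.all fun row => row.toList.getD (c-1).toNat ' ' == '.') := by
            rw [List.all_map]
            apply all_congr_mem
            intro r hr
            simp only [Function.comp_apply]
            have hrl : col ≤ r.toList.length := by have := h1 r hr; omega
            have hsh := getD_insert_shift r.toList col hrl c (by omega)
            unfold dcInsertRow
            rw [String.toList_ofList, hsh]
          rw [e1, e2, e3, hall3]
        · -- hp_low
          intro c hc
          unfold eaPred
          have e : (decide (((col : Nat) : Int) ≤ c)) = false := by
            apply decide_eq_false; omega
          rw [e]
          simp
        · -- hp_col
          unfold eaPred
          have e1 : (decide (((col : Nat) : Int) ≤ ((col : Nat) : Int))) = true := by simp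
          have e2 : (decide (((col : Nat) : Int) < ((cols : Nat) : Int))) = true := by
            apply decide_eq_true; omega
          have e3 : (((col : Nat) : Int)).toNat = col := by omega
          rw [e1, e2, e3, hdots]
          rfl

theorem enum_flatMap (P : Int → Prop) [DecidablePred P] (xs : List Char) :
    ∀ s : Int, (PySem.List.enumerate xs s).flatMap (fun q => if P q.1 then '.' :: [q.2] else [q.2])
      = insFrom (fun c => decide (P c)) s xs := by
  induction xs with
  | nil => intro s; rfl
  | cons ch t ih =>
    intro s
    rw [PySem.List.enumerate_cons, List.flatMap_cons, ih (s+1)]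
    by_cases h : P s <;> simp [insFrom, h]

-- ===== VERDICT (by name: the statement is the Claim_ definition above) =====
theorem double_columns_with_only_dots_spec : Claim_equal_double_columns_with_only_dots := by
  intro arr _ hpre
  obtain ⟨hne, hlen⟩ := hpre
  show double_columns_with_only_dots arr = double_columns_with_only_dots_alt arr
  unfold double_columns_with_only_dots
  rw [dcLoop_eq ((arr.headD "").toList.length + 1) arr 0 hlen (by omega)]
  simp only [double_columns_with_only_dots_alt]
  apply List.map_congr_left
  intro row _
  rw [enum_flatMap]
  congr 1
  apply insFrom_congr
  intro c hc0
  unfold eaPred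
  apply Bool.eq_iff_iff.mpr
  simp only [Bool.and_eq_true, decide_eq_true_eq, PySem.Set.mem_ofList,
    List.mem_filter, PySem.List.mem_pyRange_one]
  constructor
  · rintro ⟨⟨hA, hB⟩, hC⟩
    exact ⟨⟨by omega, hB⟩, hC⟩
  · rintro ⟨⟨hA, hB⟩, hC⟩
    exact ⟨⟨by omega, hB⟩, hC⟩
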